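-- pv_equiv track=rewrite | github.com/yyhh314/VisualRadio | VisualRadio/script.py | find_similar_strings
-- ===== SOURCE A (Python) =====
-- def get_ngrams(string, n):
--     ngrams = []
--     for i in range(len(string) - n + 1):
--         ngram = string[i:i+n].strip()
--         ngrams.append(ngram)
--     return ngrams
--
-- def find_similar_strings(target, string):
--     target_ngrams = get_ngrams(target, len(target)//2)
--     contained = []
--     finded = False
--     for ngram in target_ngrams:
--         if string.find(ngram) != -1:
--             contained.append(ngram)
--             finded = True
--     if finded:
--         return contained
--     return None
-- ===== SOURCE B (Python) =====
-- def find_similar_strings(target, string):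
--     n = len(target) // 2
--     grams = [target[i:i+n].strip() for i in range(len(target) - n + 1)]
--     lengths = {len(g) for g in grams}
--     subs = set(string[j:j+l] for l in lengths for j in range(len(string) - l + 1))
--     contained = [g for g in grams if g in subs]
--     return contained if contained else None
-- ===== Notes on version B (the rewrite author's own statement) =====
-- stated objective: alternative
-- what changed: Instead of scanning `string` once per ngram with str.find, B builds one hash set of all substrings of `string` whose lengths occur among the ngrams, then answers every ngram by a set lookup.
import Mathlib
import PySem

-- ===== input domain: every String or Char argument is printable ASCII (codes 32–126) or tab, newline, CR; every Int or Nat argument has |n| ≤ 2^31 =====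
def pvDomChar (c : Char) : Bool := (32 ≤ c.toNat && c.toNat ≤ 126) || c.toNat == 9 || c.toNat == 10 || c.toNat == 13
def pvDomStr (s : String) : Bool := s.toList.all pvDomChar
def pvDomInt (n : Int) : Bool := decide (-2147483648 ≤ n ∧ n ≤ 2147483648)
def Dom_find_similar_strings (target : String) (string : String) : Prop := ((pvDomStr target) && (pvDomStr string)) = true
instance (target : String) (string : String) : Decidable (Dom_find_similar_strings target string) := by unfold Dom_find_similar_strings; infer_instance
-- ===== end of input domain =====

-- B replaces A's per-ngram scan of `string` by one precomputed set of all substrings of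
-- `string` with a length occurring among the ngrams, answered by set lookups (an alternative
-- algorithm; same results).


-- ===== PORT A =====
def get_ngrams (s : String) (n : Int) : List String :=
  (PySem.List.pyRange 0 ((PySem.Str.len s : Int) - n + 1) 1).foldl
    (fun ngrams i => ngrams ++ [PySem.Str.strip (PySem.Str.slice s (some i) (some (i + n)))]) []

def find_similar_strings (target : String) (string : String) : Option (List String) :=
  let target_ngrams := get_ngrams target (PySem.Int.floordiv (PySem.Str.len target) 2)
  let st := target_ngrams.foldl
    (fun (st : List String × Bool) ngram =>
      if PySem.Str.find string ngram ≠ -1 then (st.1 ++ [ngram], true) else st)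
    ([], false)
  if st.2 then some st.1 else none

-- ===== PORT B =====
def find_similar_strings_alt (target : String) (string : String) : Option (List String) :=
  let n : Int := PySem.Int.floordiv (PySem.Str.len target) 2
  let grams := (PySem.List.pyRange 0 ((PySem.Str.len target : Int) - n + 1) 1).map
    (fun i => PySem.Str.strip (PySem.Str.slice target (some i) (some (i + n))))
  let lengths : PySem.Set Int := PySem.Set.ofList (grams.map (fun g => (PySem.Str.len g : Int)))
  let subs : PySem.Set String := PySem.Set.ofList (lengths.flatMap
    (fun l => (PySem.List.pyRange 0 ((PySem.Str.len string : Int) - l + 1) 1).map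
      (fun j => PySem.Str.slice string (some j) (some (j + l)))))
  let contained := grams.filter (fun g => PySem.Set.contains subs g)
  if contained = [] then none else some contained

-- ===== PRECONDITION & SPEC =====
def Spec_find_similar_strings (target : String) (string : String) (out : Option (List String)) : Prop := out = find_similar_strings_alt target string
instance (target : String) (string : String) (out : Option (List String)) : Decidable (Spec_find_similar_strings target string out) := by unfold Spec_find_similar_strings; infer_instance

-- ===== CLAIM (what is proved, stated in full; the proofs are below) =====
def Claim_equal_find_similar_strings : Prop := ∀ (target : String) (string : String), Dom_find_similar_strings target string → Spec_find_similar_strings target string (find_similar_strings target string)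

-- ===== LEMMAS AND PROOFS =====

-- A's append loop is the map B writes as a comprehension.
theorem get_ngrams_eq_map (s : String) (n : Int) :
    get_ngrams s n = (PySem.List.pyRange 0 ((PySem.Str.len s : Int) - n + 1) 1).map
      (fun i => PySem.Str.strip (PySem.Str.slice s (some i) (some (i + n)))) := by
  unfold get_ngrams
  rw [PySem.List.foldl_append_singleton_eq_map]
  simp

-- A's two-accumulator collect-and-flag loop is (filter, any).
theorem loopA_eq (string : String) (grams : List String) :
    ∀ acc : List String × Bool,
    grams.foldl (fun (st : List String × Bool) ngram =>
        if PySem.Str.find string ngram ≠ -1 then (st.1 ++ [ngram], true) else st) acc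
      = (acc.1 ++ grams.filter (fun g => decide (PySem.Str.find string g ≠ -1)),
         acc.2 || grams.any (fun g => decide (PySem.Str.find string g ≠ -1))) := by
  induction grams with
  | nil => intro acc; simp
  | cons g t ih =>
    intro acc
    rw [List.foldl_cons]
    by_cases h : PySem.Str.find string g ≠ -1
    · have h' : ¬ PySem.Chars.find string.toList g.toList = -1 := by simpa using h
      rw [if_pos h, ih]
      simp [List.any_cons, h']
    · have h' : PySem.Chars.find string.toList g.toList = -1 := by simpa using h
      rw [if_neg h, ih]
      simp [List.any_cons, h']

-- a slice [j:j+l] of string with 0 ≤ j, 0 ≤ l is an infix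
theorem slice_infix (s : String) (j l : Int) (hj : 0 ≤ j) (hl : 0 ≤ l) :
    (PySem.Str.slice s (some j) (some (j + l))).toList <:+: s.toList := by
  rw [PySem.Str.toList_slice, PySem.Chars.slice_eq_listSlice,
    PySem.List.slice_toNat _ hj (by omega)]
  exact ((List.take_prefix _ _).isInfix).trans (List.drop_suffix _ _).isInfix

-- an infix g of string of length len(g) is the slice at j = |prefix|
theorem infix_slice (s g : String) (h : g.toList <:+: s.toList) :
    ∃ j : Nat, (j : Int) < PySem.Str.len s - PySem.Str.len g + 1 ∧
      PySem.Str.slice s (some (j : Int)) (some ((j : Int) + PySem.Str.len g)) = g := by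
  obtain ⟨pre, suf, hdecomp⟩ := h
  have hlen : s.toList.length = pre.length + g.toList.length + suf.length := by
    rw [← hdecomp]; simp; omega
  refine ⟨pre.length, ?_, ?_⟩
  · rw [PySem.Str.len_eq, PySem.Str.len_eq]; omega
  · apply String.toList_inj.mp
    rw [PySem.Str.toList_slice, PySem.Chars.slice_eq_listSlice, PySem.Str.len_eq,
      PySem.List.slice_toNat _ (by omega) (by omega)]
    have h1 : (((pre.length : Int)) + (g.toList.length : Int)).toNat - ((pre.length : Int)).toNat
        = g.toList.length := by omega
    have h2 : ((pre.length : Int)).toNat = pre.length := by omega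
    rw [h1, h2, ← hdecomp]
    simp

-- the central fact: membership in B's substring set = A's find test, for any gram
theorem contains_eq (string : String) (grams : List String) (g : String) (hg : g ∈ grams) :
    PySem.Set.contains
      (PySem.Set.ofList ((PySem.Set.ofList (grams.map (fun g => PySem.Str.len g))).flatMap
        (fun l => (PySem.List.pyRange 0 (PySem.Str.len string - l + 1) 1).map
          (fun j => PySem.Str.slice string (some j) (some (j + l)))))) g
      = decide (PySem.Str.find string g ≠ -1) := by
  rcases Bool.eq_false_or_eq_true (decide (PySem.Str.find string g ≠ -1)) with hb | hb
  case inr => -- find = -1 : g is not an infix, so not in the set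
    rw [hb]
    rw [decide_eq_false_iff_not, not_not, PySem.Str.find_eq_neg_one_iff] at hb
    rw [← Bool.not_eq_true]
    intro hc
    rw [PySem.Set.contains_iff, PySem.Set.mem_ofList, List.mem_flatMap] at hc
    obtain ⟨l, hl, hmem⟩ := hc
    rw [List.mem_map] at hmem
    obtain ⟨j, hj, hslice⟩ := hmem
    rw [PySem.List.mem_pyRange_one] at hj
    have hl0 : 0 ≤ l := by
      rw [PySem.Set.mem_ofList, List.mem_map] at hl
      obtain ⟨g', _, hg'⟩ := hl
      rw [← hg', PySem.Str.len_eq]; omega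
    exact hb (hslice ▸ slice_infix string j l hj.1 hl0)
  case inl => -- find ≠ -1 : g is an infix, so in the set
    rw [hb]
    rw [decide_eq_true_eq] at hb
    rw [PySem.Str.find_ne_neg_one_iff] at hb
    obtain ⟨j, hjlt, hslice⟩ := infix_slice string g hb
    rw [PySem.Set.contains_iff, PySem.Set.mem_ofList, List.mem_flatMap]
    refine ⟨PySem.Str.len g, ?_, ?_⟩
    · rw [PySem.Set.mem_ofList, List.mem_map]; exact ⟨g, hg, rfl⟩
    · rw [List.mem_map]
      refine ⟨(j : Int), ?_, hslice⟩
      rw [PySem.List.mem_pyRange_one]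
      exact ⟨by omega, hjlt⟩

-- ===== VERDICT (by name: the statement is the Claim_ definition above) =====
theorem find_similar_strings_spec : Claim_equal_find_similar_strings := by
  intro target string _
  unfold Spec_find_similar_strings
  simp only [find_similar_strings, find_similar_strings_alt, get_ngrams_eq_map, loopA_eq]
  set grams := (PySem.List.pyRange 0 (PySem.Str.len target -
      PySem.Int.floordiv (PySem.Str.len target) 2 + 1) 1).map
    (fun i => PySem.Str.strip (PySem.Str.slice target (some i)
      (some (i + PySem.Int.floordiv (PySem.Str.len target) 2)))) with hgrams
  have hfilter : grams.filter (fun g => PySem.Set.contains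
      (PySem.Set.ofList ((PySem.Set.ofList (grams.map (fun g => PySem.Str.len g))).flatMap
        (fun l => (PySem.List.pyRange 0 (PySem.Str.len string - l + 1) 1).map
          (fun j => PySem.Str.slice string (some j) (some (j + l)))))) g)
      = grams.filter (fun g => decide (PySem.Str.find string g ≠ -1)) :=
    List.filter_congr (fun g hg => contains_eq string grams g hg)
  rw [hfilter]
  rcases Bool.eq_false_or_eq_true
      (grams.any (fun g => decide (PySem.Str.find string g ≠ -1))) with h | h <;> rw [h]
  · have hne : grams.filter (fun g => decide (PySem.Str.find string g ≠ -1)) ≠ [] := by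
      intro hnil
      obtain ⟨a, ha, hp⟩ := List.any_eq_true.mp h
      have hmem : a ∈ grams.filter (fun g => decide (PySem.Str.find string g ≠ -1)) :=
        List.mem_filter.mpr ⟨ha, hp⟩
      rw [hnil] at hmem
      exact absurd hmem (List.not_mem_nil)
    simp only [Bool.false_or, List.nil_append]
    rw [if_pos trivial, if_neg hne]
  · have hnil : grams.filter (fun g => decide (PySem.Str.find string g ≠ -1)) = [] :=
      List.filter_eq_nil_iff.mpr (fun a ha => by
        simpa using List.any_eq_false.mp h a ha)
    simp only [Bool.false_or, List.nil_append]
    rw [if_neg Bool.false_ne_true, if_pos hnil]
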